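-- pv_equiv track=rewrite | github.com/loopy-dev/algorithm-v2 | hackerrank/preparation-kit/day6-2.py | getOneRowPermutations
-- ===== SOURCE A (Python) =====
-- MOD = 10**9 + 7
--
-- def getOneRowPermutations(m):
--     """
--     calculate 1 floor permutations
--     """
--     dp = [0] * (m + 10)
--     dp[0] = 1
--
--     # calculate 1 floor permutations
--     for i in range(1, m + 1):
--         for j in range(1, 5):
--             dp[i] += dp[i - j]
--             dp[i] %= MOD
--
--     return dp
-- ===== SOURCE B (Python) =====
-- MOD = 10**9 + 7
--
-- def getOneRowPermutations(m):
--     """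
--     calculate 1 floor permutations (sliding-window sum of the last four entries)
--     """
--     dp = [0] * (m + 10)
--     dp[0] = 1
--     window = 1  # dp[0] + 0 + 0 + 0
--     for i in range(1, m + 1):
--         dp[i] = window % MOD
--         window += dp[i]
--         if i >= 4:
--             window -= dp[i - 4]
--     return dp
-- ===== Notes on version B (the rewrite author's own statement) =====
-- stated objective: faster
-- what changed: Replaced the inner four-term re-summing loop (with per-addition mod and negative-index wraparound into the zero padding) by a single running window sum of the last four entries, updated in O(1) per step.
import Mathlib
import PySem

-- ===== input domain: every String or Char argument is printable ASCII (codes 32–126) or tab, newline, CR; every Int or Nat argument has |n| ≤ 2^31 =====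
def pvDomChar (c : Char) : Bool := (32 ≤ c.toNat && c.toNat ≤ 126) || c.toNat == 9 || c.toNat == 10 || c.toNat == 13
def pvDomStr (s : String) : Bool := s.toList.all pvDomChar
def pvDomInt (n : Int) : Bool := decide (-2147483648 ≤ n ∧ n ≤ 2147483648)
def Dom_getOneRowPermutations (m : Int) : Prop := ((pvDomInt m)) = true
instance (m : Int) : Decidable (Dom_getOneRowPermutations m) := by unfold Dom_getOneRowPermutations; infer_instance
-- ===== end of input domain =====

-- Same tetranacci dp array mod 1e9+7; B keeps a running sum of the last four entries instead of A's inner four-term loop (fewer list reads/writes per step).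


def pvMOD : Int := 1000000007

-- ===== PORT A =====
def getOneRowPermutations (m : Int) : List Int :=
  let dp := List.replicate (m + 10).toNat 0
  let dp := PySem.List.pySetD dp 0 1
  (PySem.List.pyRange 1 (m + 1) 1).foldl (fun dp i =>
    (PySem.List.pyRange 1 5 1).foldl (fun dp j =>
      PySem.List.pySetD dp i
        (PySem.Int.mod (PySem.List.pyGetD dp i 0 + PySem.List.pyGetD dp (i - j) 0) pvMOD)) dp) dp

-- ===== PORT B =====
def getOneRowPermutations_alt (m : Int) : List Int :=
  let dp := List.replicate (m + 10).toNat 0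
  let dp := PySem.List.pySetD dp 0 1
  ((PySem.List.pyRange 1 (m + 1) 1).foldl (fun (st : List Int × Int) i =>
      let v := PySem.Int.mod st.2 pvMOD
      let dp := PySem.List.pySetD st.1 i v
      (dp, st.2 + v - (if 4 ≤ i then PySem.List.pyGetD dp (i - 4) 0 else 0))) (dp, 1)).1

-- ===== PRECONDITION & SPEC =====
-- Pre_ excludes exactly m ≤ -10, where A's `dp[0] = 1` on the empty list raises IndexError.
def Pre_getOneRowPermutations (m : Int) : Prop := -9 ≤ m
instance (m : Int) : Decidable (Pre_getOneRowPermutations m) := by unfold Pre_getOneRowPermutations; infer_instance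
def pvWitness_getOneRowPermutations : Int := (5)

def Spec_getOneRowPermutations (m : Int) (out : List Int) : Prop := out = getOneRowPermutations_alt m
instance (m : Int) (out : List Int) : Decidable (Spec_getOneRowPermutations m out) := by unfold Spec_getOneRowPermutations; infer_instance

-- ===== CLAIM (what is proved, stated in full; the proofs are below) =====
def Claim_equal_getOneRowPermutations : Prop := ∀ (m : Int), Dom_getOneRowPermutations m → Pre_getOneRowPermutations m → Spec_getOneRowPermutations m (getOneRowPermutations m)

-- ===== LEMMAS AND PROOFS =====

-- the initial dp array
def pvDp0 (m : Int) : List Int := PySem.List.pySetD (List.replicate (m + 10).toNat 0) 0 1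

-- A's loop body
def pvStepA (dp : List Int) (i : Int) : List Int :=
  (PySem.List.pyRange 1 5 1).foldl (fun dp j =>
    PySem.List.pySetD dp i
      (PySem.Int.mod (PySem.List.pyGetD dp i 0 + PySem.List.pyGetD dp (i - j) 0) pvMOD)) dp

-- B's loop body
def pvStepB (st : List Int × Int) (i : Int) : List Int × Int :=
  let v := PySem.Int.mod st.2 pvMOD
  let dp := PySem.List.pySetD st.1 i v
  (dp, st.2 + v - (if 4 ≤ i then PySem.List.pyGetD dp (i - 4) 0 else 0))

-- value read with "negative index contributes zero" semantics
def pvVal (dp : List Int) (t : Int) : Int := if 0 ≤ t then PySem.List.pyGetD dp t 0 else 0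

theorem getOneRowPermutations_eq_foldA (m : Int) :
    getOneRowPermutations m = (PySem.List.pyRange 1 (m + 1) 1).foldl pvStepA (pvDp0 m) := rfl

theorem getOneRowPermutations_alt_eq_foldB (m : Int) :
    getOneRowPermutations_alt m = ((PySem.List.pyRange 1 (m + 1) 1).foldl pvStepB (pvDp0 m, 1)).1 := rfl

-- helper: any read of a replicate-0 list with default 0 is 0
theorem pvGetD_replicate_zero (n i : Nat) : (List.replicate n (0:Int)).getD i 0 = 0 := by
  simp only [List.getD, List.getElem?_replicate]
  split <;> rfl

theorem pvRange15 : PySem.List.pyRange 1 5 1 = [1, 2, 3, 4] := by decide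

theorem pvMOD_pos : (0:Int) < pvMOD := by decide

-- Python's chained per-addition mod equals one mod of the sum
theorem pvModChain (a b c d : Int) :
    PySem.Int.mod (PySem.Int.mod (PySem.Int.mod (PySem.Int.mod (0 + a) pvMOD + b) pvMOD + c) pvMOD + d) pvMOD
      = PySem.Int.mod (a + b + c + d) pvMOD := by
  have h : ∀ x y : Int, (x % pvMOD + y) % pvMOD = (x + y) % pvMOD := by
    intro x y
    rw [Int.add_emod, Int.emod_emod_of_dvd x dvd_rfl, ← Int.add_emod]
  simp only [PySem.Int.mod_eq_emod_of_pos pvMOD_pos, zero_add, h]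

theorem pvDp0_eq (m : Int) (hm : 1 ≤ m) :
    pvDp0 m = 1 :: List.replicate ((m + 10).toNat - 1) 0 := by
  unfold pvDp0
  rw [PySem.List.pySetD_of_nonneg _ _ (by norm_num)]
  have h : (m + 10).toNat = ((m + 10).toNat - 1) + 1 := by omega
  rw [h, List.replicate_succ]
  rfl

-- positive in-range read
theorem pvReadPos (e : List Int) (t : Int) (h0 : 0 ≤ t) (hlt : t < (e.length : Int)) :
    PySem.List.pyGetD e t 0 = e.getD t.toNat 0 := by
  rw [PySem.List.pyGetD_eq_getElem e 0 h0 hlt, List.getD_eq_getElem e 0 (by omega)]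

-- a small negative read wraps into the trailing zero padding
theorem pvReadNeg (e : List Int) (t : Int) (h1 : -3 ≤ t) (h2 : t < 0) (hlen : 3 ≤ e.length)
    (hz : ∀ s : Nat, e.length ≤ s + 3 → s < e.length → e.getD s 0 = 0) :
    PySem.List.pyGetD e t 0 = 0 := by
  obtain ⟨k', hk1, hk3, ht⟩ : ∃ k' : Nat, 0 < k' ∧ k' ≤ 3 ∧ t = -(k' : Int) :=
    ⟨(-t).toNat, by omega, by omega, by omega⟩
  subst ht
  rw [PySem.List.pyGetD_neg_natCast e k' 0 hk1 (by omega)]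
  rw [← List.getD_eq_getElem e 0 (by omega)]
  exact hz _ (by omega) (by omega)

-- getD through a set at a different index
theorem pvGetD_set_ne (e : List Int) (a s : Nat) (v : Int) (h : s ≠ a) :
    (e.set a v).getD s 0 = e.getD s 0 := by
  simp [List.getD, List.getElem?_set_ne (Ne.symm h)]

-- getD reading back a set value
theorem pvGetD_set_self (e : List Int) (a : Nat) (v : Int) (h : a < e.length) :
    (e.set a v).getD a 0 = v := by
  simp [List.getD, List.getElem?_set_self h]

theorem pvStepB_eq (dp : List Int) (w i : Int) :
    pvStepB (dp, w) i
      = (PySem.List.pySetD dp i (PySem.Int.mod w pvMOD),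
         w + PySem.Int.mod w pvMOD
           - (if 4 ≤ i then
                PySem.List.pyGetD (PySem.List.pySetD dp i (PySem.Int.mod w pvMOD)) (i - 4) 0
              else 0)) := rfl

set_option maxHeartbeats 1000000 in
-- the loop invariant
theorem pvInv (m : Int) (hm : 1 ≤ m) : ∀ k : Nat, (k : Int) ≤ m →
    ((PySem.List.pyRange 1 ((k : Int) + 1) 1).foldl pvStepB (pvDp0 m, 1)).1
        = (PySem.List.pyRange 1 ((k : Int) + 1) 1).foldl pvStepA (pvDp0 m) ∧
    ((PySem.List.pyRange 1 ((k : Int) + 1) 1).foldl pvStepA (pvDp0 m)).length = (m + 10).toNat ∧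
    (∀ t : Nat, k < t → t < (m + 10).toNat →
        ((PySem.List.pyRange 1 ((k : Int) + 1) 1).foldl pvStepA (pvDp0 m)).getD t 0 = 0) ∧
    ((PySem.List.pyRange 1 ((k : Int) + 1) 1).foldl pvStepB (pvDp0 m, 1)).2
        = pvVal ((PySem.List.pyRange 1 ((k : Int) + 1) 1).foldl pvStepA (pvDp0 m)) (k : Int)
        + pvVal ((PySem.List.pyRange 1 ((k : Int) + 1) 1).foldl pvStepA (pvDp0 m)) ((k : Int) - 1)
        + pvVal ((PySem.List.pyRange 1 ((k : Int) + 1) 1).foldl pvStepA (pvDp0 m)) ((k : Int) - 2)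
        + pvVal ((PySem.List.pyRange 1 ((k : Int) + 1) 1).foldl pvStepA (pvDp0 m)) ((k : Int) - 3) := by
  intro k
  induction k with
  | zero =>
    intro _
    rw [show (((0:Nat) : Int) + 1) = 1 by norm_num, PySem.List.pyRange_one_eq_nil le_rfl]
    simp only [List.foldl_nil]
    rw [pvDp0_eq m hm]
    refine ⟨trivial, ?_, ?_, ?_⟩
    · simp only [List.length_cons, List.length_replicate]; omega
    · intro t ht _
      obtain ⟨t', rfl⟩ : ∃ t', t = t' + 1 := ⟨t - 1, by omega⟩
      rw [List.getD_cons_succ]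
      exact pvGetD_replicate_zero _ t'
    · show (1 : Int) = _
      simp only [pvVal, Nat.cast_zero]
      rw [if_pos le_rfl, if_neg (by norm_num), if_neg (by norm_num), if_neg (by norm_num)]
      rw [pvReadPos _ _ le_rfl (by simp)]
      simp
  | succ k ih =>
    intro hk1
    have hk : (k : Int) ≤ m := by push_cast at hk1 ⊢; omega
    obtain ⟨hB, hlen, hz, hw⟩ := ih hk
    set dpA := (PySem.List.pyRange 1 ((k : Int) + 1) 1).foldl pvStepA (pvDp0 m) with hdpA
    set prevB := (PySem.List.pyRange 1 ((k : Int) + 1) 1).foldl pvStepB (pvDp0 m, 1) with hprevB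
    set a1 := pvVal dpA ((k : Int)) with ha1
    set a2 := pvVal dpA ((k : Int) - 1) with ha2
    set a3 := pvVal dpA ((k : Int) - 2) with ha3
    set a4 := pvVal dpA ((k : Int) - 3) with ha4
    have hsplit : PySem.List.pyRange 1 (((k + 1 : Nat) : Int) + 1) 1
        = PySem.List.pyRange 1 ((k : Int) + 1) 1 ++ [(k : Int) + 1] := by
      push_cast
      rw [show ((k : Int) + 1 + 1) = ((k : Int) + 1) + 1 by ring]
      exact PySem.List.pyRange_one_succ_right (by omega)
    have hpair : prevB = (dpA, a1 + a2 + a3 + a4) := by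
      rw [show prevB = (prevB.1, prevB.2) from rfl, hB, hw]
    rw [hsplit, List.foldl_append, List.foldl_append, ← hdpA, ← hprevB, hpair,
        List.foldl_cons, List.foldl_nil, List.foldl_cons, List.foldl_nil]
    -- bounds
    have hit : ((k : Int) + 1).toNat = k + 1 := by omega
    have hlen3 : 3 ≤ dpA.length := by omega
    -- reads from dpA
    have hreadA : ∀ t : Int, -3 ≤ t → t < (k : Int) + 1 → PySem.List.pyGetD dpA t 0 = pvVal dpA t := by
      intro t h1 h2
      by_cases h0 : 0 ≤ t
      · simp only [pvVal, if_pos h0]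
      · rw [pvVal, if_neg h0, pvReadNeg dpA t h1 (by omega) hlen3]
        intro s hs1 hs2
        exact hz s (by omega) (by omega)
    have hreadAi : PySem.List.pyGetD dpA ((k : Int) + 1) 0 = 0 := by
      rw [pvReadPos dpA _ (by omega) (by omega), hit]
      exact hz (k + 1) (by omega) (by omega)
    -- reads from dpA.set (k+1) v
    have hlenS : ∀ v : Int, (dpA.set (k + 1) v).length = dpA.length := fun v => by
      rw [List.length_set]
    have hreadS : ∀ v : Int, ∀ t : Int, -3 ≤ t → t < (k : Int) + 1 →
        PySem.List.pyGetD (dpA.set (k + 1) v) t 0 = pvVal dpA t := by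
      intro v t h1 h2
      by_cases h0 : 0 ≤ t
      · rw [pvReadPos _ _ h0 (by rw [hlenS]; omega), pvGetD_set_ne _ _ _ _ (by omega), pvVal,
            if_pos h0, pvReadPos _ _ h0 (by omega)]
      · rw [pvVal, if_neg h0, pvReadNeg _ t h1 (by omega) (by rw [hlenS]; omega)]
        intro s hs1 hs2
        rw [hlenS] at hs1 hs2
        rw [pvGetD_set_ne _ _ _ _ (by omega)]
        exact hz s (by omega) (by omega)
    have hreadSi : ∀ v : Int, PySem.List.pyGetD (dpA.set (k + 1) v) ((k : Int) + 1) 0 = v := by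
      intro v
      rw [pvReadPos _ _ (by omega) (by rw [hlenS]; omega), hit]
      exact pvGetD_set_self dpA (k + 1) v (by omega)
    have hsetD : ∀ (e : List Int) (v : Int),
        PySem.List.pySetD e ((k : Int) + 1) v = e.set (k + 1) v := by
      intro e v
      rw [PySem.List.pySetD_of_nonneg e v (by omega), hit]
    -- A's step
    have hstepA : pvStepA dpA ((k : Int) + 1)
        = dpA.set (k + 1) (PySem.Int.mod (a1 + a2 + a3 + a4) pvMOD) := by
      rw [pvStepA, pvRange15]
      simp only [List.foldl_cons, List.foldl_nil, hsetD, List.set_set]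
      rw [hreadAi, hreadA ((k : Int) + 1 - 1) (by omega) (by omega),
          hreadSi, hreadS _ ((k : Int) + 1 - 2) (by omega) (by omega),
          hreadSi, hreadS _ ((k : Int) + 1 - 3) (by omega) (by omega),
          hreadSi, hreadS _ ((k : Int) + 1 - 4) (by omega) (by omega)]
      rw [show (k : Int) + 1 - 1 = (k : Int) by ring, show (k : Int) + 1 - 2 = (k : Int) - 1 by ring,
          show (k : Int) + 1 - 3 = (k : Int) - 2 by ring, show (k : Int) + 1 - 4 = (k : Int) - 3 by ring]
      rw [← ha1, ← ha2, ← ha3, ← ha4, pvModChain]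
    set v := PySem.Int.mod (a1 + a2 + a3 + a4) pvMOD with hv
    -- B's step
    have hstepB : pvStepB (dpA, a1 + a2 + a3 + a4) ((k : Int) + 1)
        = (dpA.set (k + 1) v, (a1 + a2 + a3 + a4) + v - a4) := by
      have h1 : (if 4 ≤ (k : Int) + 1 then
            PySem.List.pyGetD (dpA.set (k + 1) v) ((k : Int) + 1 - 4) 0 else 0) = a4 := by
        by_cases h4 : 4 ≤ (k : Int) + 1
        · rw [if_pos h4, hreadS v ((k : Int) + 1 - 4) (by omega) (by omega),
              show (k : Int) + 1 - 4 = (k : Int) - 3 by ring]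
        · rw [if_neg h4, ha4, pvVal, if_neg (by omega)]
      rw [pvStepB_eq, hsetD, ← hv, h1]
    rw [hstepA, hstepB]
    refine ⟨rfl, by rw [hlenS]; exact hlen, ?_, ?_⟩
    · intro t ht1 ht2
      rw [pvGetD_set_ne _ _ _ _ (by omega)]
      exact hz t (by omega) ht2
    · have hvv : ∀ t : Int, -3 ≤ t → t < (k : Int) + 1 →
          pvVal (dpA.set (k + 1) v) t = pvVal dpA t := by
        intro t h1 h2
        by_cases h0 : 0 ≤ t
        · simp only [pvVal, if_pos h0]
          rw [pvReadPos _ _ h0 (by rw [hlenS]; omega), pvGetD_set_ne _ _ _ _ (by omega),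
              pvReadPos _ _ h0 (by omega)]
        · simp only [pvVal, if_neg h0]
      have hvi : pvVal (dpA.set (k + 1) v) ((k : Int) + 1) = v := by
        rw [pvVal, if_pos (by omega)]
        exact hreadSi v
      push_cast
      rw [hvi]
      rw [show (k : Int) + 1 - 1 = (k : Int) by ring, show (k : Int) + 1 - 2 = (k : Int) - 1 by ring,
          show (k : Int) + 1 - 3 = (k : Int) - 2 by ring]
      rw [hvv (k : Int) (by omega) (by omega), hvv ((k : Int) - 1) (by omega) (by omega),
          hvv ((k : Int) - 2) (by omega) (by omega), ← ha1, ← ha2, ← ha3]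
      ring

-- ===== VERDICT (by name: the statement is the Claim_ definition above) =====
theorem getOneRowPermutations_spec : Claim_equal_getOneRowPermutations := by
  intro m _ hpre
  unfold Spec_getOneRowPermutations
  rw [getOneRowPermutations_eq_foldA, getOneRowPermutations_alt_eq_foldB]
  rcases (by omega : m ≤ 0 ∨ 1 ≤ m) with hm | hm
  · rw [PySem.List.pyRange_one_eq_nil (by omega : m + 1 ≤ 1)]
    simp
  · have hcast : m + 1 = ((m.toNat : Int)) + 1 := by omega
    rw [hcast]
    exact ((pvInv m hm m.toNat (by omega)).1).symm
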